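-- pv_equiv track=rewrite | github.com/jrh-dev/Advent-of-Code-2022 | Python/d01.py | solve
-- ===== SOURCE A (Python) =====
-- def solve(input:list[str], top:int) -> int:
--     '''
--     Solves day 1 of AOC 2022
--     Parameters: input -- list[str], top -- int
--     Returns: value -- int
--     '''
--     input = [int(x) if x not in '' else None for x in input]
--     splits = [i for i, e in enumerate(input) if e == None]
--     splits.append(len(input))
--     res = []
--     start = 0
--
--     for ii in range(len(splits)):
--         res.append(sum(input[start:splits[ii]]))
--         start = splits[ii] + 1
--
--     res.sort(reverse=True)
--
--     return sum(res[0:top])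
-- ===== SOURCE B (Python) =====
-- def solve(input: list[str], top: int) -> int:
--     '''
--     Solves day 1 of AOC 2022 -- single streaming pass with a running accumulator.
--     Parameters: input -- list[str], top -- int
--     Returns: value -- int
--     '''
--     res = []
--     acc = 0
--     for entry in input:
--         if entry == '':
--             res.append(acc)
--             acc = 0
--         else:
--             acc += int(entry)
--     res.append(acc)
--     res.sort(reverse=True)
--     return sum(res[0:top])
-- ===== Notes on version B (the rewrite author's own statement) =====
-- stated objective: simpler
-- what changed: B replaces A's None-marker list, enumerate-built split-index table and per-group slice-and-sum loop with a single streaming pass that keeps a running accumulator flushed at each blank entry, then sorts descending and sums the top slice as A does.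
import Mathlib
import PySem

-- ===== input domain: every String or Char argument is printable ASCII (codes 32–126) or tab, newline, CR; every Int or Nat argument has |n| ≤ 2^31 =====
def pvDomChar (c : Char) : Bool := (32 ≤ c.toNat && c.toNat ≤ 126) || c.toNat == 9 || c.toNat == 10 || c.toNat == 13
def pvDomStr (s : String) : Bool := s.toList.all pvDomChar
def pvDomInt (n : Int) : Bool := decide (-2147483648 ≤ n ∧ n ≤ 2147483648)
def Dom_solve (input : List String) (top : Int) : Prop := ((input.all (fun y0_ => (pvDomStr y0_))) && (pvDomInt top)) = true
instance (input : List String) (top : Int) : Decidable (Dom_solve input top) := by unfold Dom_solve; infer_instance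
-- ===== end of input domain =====

-- B replaces A's None-markers + split-index table + per-group slicing with one
-- accumulating streaming pass (objective: simpler; same sort-and-slice finish).

-- ===== PORT A =====
-- literal port of A: mark blanks None, collect split indices via enumerate,
-- then slice-and-sum each segment, sort descending, sum the res[0:top] slice.
def solve (input : List String) (top : Int) : Int :=
  let opt : List (Option Int) :=
    input.map (fun x => if x = "" then none else some ((PySem.Int.ofStr? x).getD 0))
  let splits : List Int :=
    (PySem.List.enumerate opt 0).filterMap (fun p => if p.2 = none then some p.1 else none)
  let splits := splits ++ [(opt.length : Int)]
  let p := splits.foldl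
    (fun (st : List Int × Int) s =>
      (st.1 ++ [(PySem.List.slice opt (some st.2) (some s)).foldl (fun a o => a + o.getD 0) 0],
       s + 1))
    ([], 0)
  let res := PySem.List.sorted p.1 (fun x => x) true
  (PySem.List.slice res (some 0) (some top)).foldl (· + ·) 0

-- ===== PORT B =====
-- port of Source B: one pass with a running accumulator, flushed at each blank and
-- once at the end; then sort descending and sum res[0:top].
def solve_alt (input : List String) (top : Int) : Int :=
  let p := input.foldl
    (fun (st : List Int × Int) entry =>
      if entry = "" then (st.1 ++ [st.2], 0)
      else (st.1, st.2 + (PySem.Int.ofStr? entry).getD 0))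
    ([], 0)
  let res := p.1 ++ [p.2]
  let res := PySem.List.sorted res (fun x => x) true
  (PySem.List.slice res (some 0) (some top)).foldl (· + ·) 0

-- ===== PRECONDITION & SPEC =====
-- Pre_ excludes exactly the inputs where Python A raises ValueError: a
-- non-empty string that int() cannot parse.
def Pre_solve (input : List String) (top : Int) : Prop :=
  ∀ s ∈ input, s ≠ "" → (PySem.Int.ofStr? s).isSome
instance (input : List String) (top : Int) : Decidable (Pre_solve input top) := by
  unfold Pre_solve; infer_instance
def pvWitness_solve : List String × Int := (["1", "", "2", "3"], 2)
def Spec_solve (input : List String) (top : Int) (out : Int) : Prop := out = solve_alt input top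
instance (input : List String) (top : Int) (out : Int) : Decidable (Spec_solve input top out) := by
  unfold Spec_solve; infer_instance

-- ===== CLAIM (what is proved, stated in full; the proofs are below) =====
def Claim_equal_solve : Prop := ∀ (input : List String) (top : Int), Dom_solve input top → Pre_solve input top → Spec_solve input top (solve input top)

-- ===== LEMMAS AND PROOFS =====

-- group sums of an Option-marked list, split at `none`, with a running accumulator
def pvGroups : List (Option Int) → Int → List Int
  | [], acc => [acc]
  | none :: t, acc => acc :: pvGroups t 0
  | some v :: t, acc => pvGroups t (acc + v)

def pvSumOpt (l : List (Option Int)) : Int := l.foldl (fun a o => a + o.getD 0) 0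

def pvConv (x : String) : Option Int :=
  if x = "" then none else some ((PySem.Int.ofStr? x).getD 0)

lemma pvSumOpt_append_some (C : List (Option Int)) (v : Int) :
    pvSumOpt (C ++ [some v]) = pvSumOpt C + v := by
  simp [pvSumOpt]

-- filterMap of the split-index comprehension over an enumerate cons
lemma pvFilt_none (t : List (Option Int)) (s : Int) :
    (PySem.List.enumerate (none :: t) s).filterMap
        (fun p => if p.2 = none then some p.1 else none)
      = s :: (PySem.List.enumerate t (s + 1)).filterMap
          (fun p => if p.2 = none then some p.1 else none) := by
  rw [PySem.List.enumerate_cons]; simp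

lemma pvFilt_some (v : Int) (t : List (Option Int)) (s : Int) :
    (PySem.List.enumerate (some v :: t) s).filterMap
        (fun p => if p.2 = none then some p.1 else none)
      = (PySem.List.enumerate t (s + 1)).filterMap
          (fun p => if p.2 = none then some p.1 else none) := by
  rw [PySem.List.enumerate_cons]; simp

-- A's slice loop over the split indices computes the group sums
lemma pvLoopA (L : List (Option Int)) : ∀ (C : List (Option Int)) (j : Nat)
    (r : List Int) (M : List (Option Int)), M.drop j = C ++ L →
    (List.foldl
      (fun (st : List Int × Int) s =>
        (st.1 ++ [(PySem.List.slice M (some st.2) (some s)).foldl (fun a o => a + o.getD 0) 0],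
         s + 1))
      (r, (j : Int))
      (((PySem.List.enumerate L ((j + C.length : Nat) : Int)).filterMap
          (fun p => if p.2 = none then some p.1 else none)) ++
        [((j + C.length : Nat) : Int) + L.length])).1
    = r ++ pvGroups L (pvSumOpt C) := by
  induction L with
  | nil =>
    intro C j r M hM
    have hslice : PySem.List.slice M (some (j : Int)) (some ((j + C.length : Nat) : Int)) = C := by
      rw [PySem.List.slice_natCast]
      simp [hM]
    simp only [PySem.List.enumerate_nil, List.filterMap_nil, List.nil_append,
      List.length_nil, Nat.cast_zero, add_zero, List.foldl_cons, List.foldl_nil,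
      hslice, pvGroups, pvSumOpt]
  | cons hd t ih =>
    intro C j r M hM
    cases hd with
    | none =>
      rw [pvFilt_none]
      have hslice : PySem.List.slice M (some (j : Int)) (some ((j + C.length : Nat) : Int)) = C := by
        rw [PySem.List.slice_natCast]
        simp [hM]
      have hdrop : M.drop (j + C.length + 1) = t := by
        have h1 : (M.drop j).drop (C.length + 1) = M.drop (j + C.length + 1) := by
          rw [List.drop_drop]; ring_nf
        rw [← h1, hM]
        simp [List.drop_append]
      have h2 := ih [] (j + C.length + 1) (r ++ [pvSumOpt C]) M (by simpa using hdrop)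
      simp only [List.length_nil, pvSumOpt] at h2
      simp only [List.cons_append, List.foldl_cons, hslice]
      rw [show ((j + C.length : Nat) : Int) + 1 = ((j + C.length + 1 : Nat) : Int) by push_cast; ring]
      rw [show ((j + C.length : Nat) : Int) + (((none :: t : List (Option Int)).length : Nat) : Int)
            = ((j + C.length + 1 : Nat) : Int) + (t.length : Int) by
        simp only [List.length_cons]; push_cast; ring]
      rw [h2]
      simp [pvGroups, pvSumOpt]
    | some v =>
      rw [pvFilt_some]
      have h2 := ih (C ++ [some v]) j r M (by rw [hM]; simp)
      simp only [List.length_append, List.length_cons, List.length_nil] at h2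
      rw [show ((j + C.length : Nat) : Int) + 1 = ((j + (C.length + 1) : Nat) : Int) by push_cast; ring]
      rw [show ((j + C.length : Nat) : Int) + (((some v :: t : List (Option Int)).length : Nat) : Int)
            = ((j + (C.length + 1) : Nat) : Int) + (t.length : Int) by
        simp only [List.length_cons]; push_cast; ring]
      rw [h2, pvSumOpt_append_some]
      simp [pvGroups]

-- B's streaming pass computes the same group sums
lemma pvLoopB (xs : List String) : ∀ (r : List Int) (acc : Int),
    (let p := xs.foldl
        (fun (st : List Int × Int) entry =>
          if entry = "" then (st.1 ++ [st.2], 0)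
          else (st.1, st.2 + (PySem.Int.ofStr? entry).getD 0))
        (r, acc)
     p.1 ++ [p.2]) = r ++ pvGroups (xs.map pvConv) acc := by
  induction xs with
  | nil => intro r acc; simp [pvGroups]
  | cons hd t ih =>
    intro r acc
    by_cases h : hd = ""
    · subst h
      simp only [List.map_cons, List.foldl_cons, pvConv]
      simp only [reduceIte]
      have := ih (r ++ [acc]) 0
      simp only at this
      rw [this]
      simp [pvGroups]
    · simp only [List.map_cons, List.foldl_cons, pvConv, if_neg h]
      have := ih r (acc + (PySem.Int.ofStr? hd).getD 0)
      simp only at this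
      rw [this]
      simp [pvGroups]

-- ===== VERDICT (by name: the statement is the Claim_ definition above) =====
theorem solve_spec : Claim_equal_solve := by
  intro input top _ _
  unfold Spec_solve solve solve_alt
  have hA := pvLoopA (input.map pvConv) [] 0 [] (input.map pvConv) (by simp)
  simp only [List.length_nil, Nat.cast_zero, zero_add, List.nil_append] at hA
  have hB := pvLoopB input [] 0
  simp only [List.nil_append] at hB
  simp only [show (fun (x : String) => if x = "" then (none : Option Int)
      else some ((PySem.Int.ofStr? x).getD 0)) = pvConv from rfl]
  rw [hA]
  simp only [pvSumOpt, List.foldl_nil] at *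
  rw [hB]
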